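-- pv_equiv track=rewrite | github.com/tyffanthc/RenataAI | logic/player_local_db.py | _services_flags_from_list
-- ===== SOURCE A (Python) =====
-- from typing import Any, Iterator
--
-- def _as_text(value: Any) -> str:
--     return str(value or "").strip()
--
-- def _norm_service_token(value: Any) -> str:
--     raw = _as_text(value).casefold()
--     return "".join(ch for ch in raw if ch.isalnum())
--
-- def _services_flags_from_list(values: Any) -> dict[str, int]:
--     has_uc = 0
--     has_vista = 0
--     has_market = 0
--     if isinstance(values, list):
--         for item in values:
--             token = _norm_service_token(item)
--             if not token:
--                 continue
--             if "universalcartographics" in token or token == "cartographics":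
--                 has_uc = 1
--             if "vistagenomics" in token or token == "genomics":
--                 has_vista = 1
--             if "commoditymarket" in token or token == "commodities" or token == "market":
--                 has_market = 1
--     return {"has_uc": has_uc, "has_vista": has_vista, "has_market": has_market}
-- ===== SOURCE B (Python) =====
-- from typing import Any
--
-- def _as_text(value: Any) -> str:
--     return str(value or "").strip()
--
-- def _norm_service_token(value: Any) -> str:
--     raw = _as_text(value).casefold()
--     return "".join(ch for ch in raw if ch.isalnum())
--
-- # Data-driven rule table: (flag name, substring needles, exact-match tokens)
-- _SERVICE_RULES = [
--     ("has_uc", ["universalcartographics"], ["cartographics"]),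
--     ("has_vista", ["vistagenomics"], ["genomics"]),
--     ("has_market", ["commoditymarket"], ["commodities", "market"]),
-- ]
--
-- def _services_flags_from_list(values: Any) -> dict[str, int]:
--     flags = {name: 0 for name, _, _ in _SERVICE_RULES}
--     if isinstance(values, list):
--         pending = list(_SERVICE_RULES)
--         for item in values:
--             if not pending:
--                 break
--             token = _norm_service_token(item)
--             if not token:
--                 continue
--             still = []
--             for rule in pending:
--                 name, subs, exacts = rule
--                 if any(s in token for s in subs) or token in exacts:
--                     flags[name] = 1
--                 else:
--                     still.append(rule)
--             pending = still
--     return flags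
-- ===== Notes on version B (the rewrite author's own statement) =====
-- stated objective: alternative
-- what changed: Replaces A's three hard-coded mutable flags updated by hard-coded branches with a data-driven rule table and a shrinking worklist of pending rules: each satisfied rule is removed, and the scan over items breaks early once no rules remain.
import Mathlib
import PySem

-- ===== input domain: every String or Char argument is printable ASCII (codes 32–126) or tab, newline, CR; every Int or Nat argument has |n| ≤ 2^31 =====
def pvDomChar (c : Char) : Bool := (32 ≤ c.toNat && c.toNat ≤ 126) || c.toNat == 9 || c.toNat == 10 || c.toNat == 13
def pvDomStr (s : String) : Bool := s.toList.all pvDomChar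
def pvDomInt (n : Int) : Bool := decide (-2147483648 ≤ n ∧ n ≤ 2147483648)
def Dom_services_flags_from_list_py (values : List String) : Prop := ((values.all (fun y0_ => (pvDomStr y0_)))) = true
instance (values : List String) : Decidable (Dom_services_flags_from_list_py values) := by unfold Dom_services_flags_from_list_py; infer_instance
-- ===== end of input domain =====

-- B replaces A's single loop with three hard-coded mutable flags by a data-driven rule table
-- and a shrinking worklist of pending rules with early exit (objective: alternative).


-- ===== PORT A =====
-- _norm_service_token: str(value or "") is the string itself (or "" when empty, which is the
-- same string), then strip, casefold (= lower on the ASCII domain), keep alnum chars.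
def pvNorm (s : String) : List Char :=
  (PySem.Chars.lower (PySem.Chars.strip s.toList)).filter PySem.Chars.isalnum

-- A's loop body: per item, normalize, skip an empty token, set each flag on its condition
def pvStepA (acc : Int × Int × Int) (item : String) : Int × Int × Int :=
  let token := pvNorm item
  if token = [] then acc
  else
    let u := if PySem.Chars.isIn "universalcartographics".toList token
                || token == "cartographics".toList then 1 else acc.1
    let v := if PySem.Chars.isIn "vistagenomics".toList token
                || token == "genomics".toList then 1 else acc.2.1
    let m := if PySem.Chars.isIn "commoditymarket".toList token
                || token == "commodities".toList || token == "market".toList then 1 else acc.2.2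
    (u, v, m)

-- literal port of A; the isinstance(values, list) guard is always true under the typed signature
def services_flags_from_list_py (values : List String) : List (String × Int) :=
  let st := values.foldl pvStepA ((0 : Int), (0 : Int), (0 : Int))
  [("has_uc", st.1), ("has_vista", st.2.1), ("has_market", st.2.2)]

-- ===== PORT B =====
-- the rule table: (flag name, substring needles, exact-match tokens)
structure PvRule where
  name : String
  subs : List String
  exacts : List String
deriving DecidableEq, Repr

def pvRules : List PvRule :=
  [⟨"has_uc", ["universalcartographics"], ["cartographics"]⟩,
   ⟨"has_vista", ["vistagenomics"], ["genomics"]⟩,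
   ⟨"has_market", ["commoditymarket"], ["commodities", "market"]⟩]

-- any(s in token for s in subs) or token in exacts
def pvMatch (t : List Char) (r : PvRule) : Bool :=
  r.subs.any (fun s => PySem.Chars.isIn s.toList t) || r.exacts.any (fun e => t == e.toList)

-- inner loop over the pending rules: satisfied rules set their flag, others stay pending
def pvInner (token : List Char) (acc : List PvRule × PySem.Dict String Int) (r : PvRule) :
    List PvRule × PySem.Dict String Int :=
  if pvMatch token r then (acc.1, acc.2.insert r.name 1) else (acc.1 ++ [r], acc.2)

-- per item: break when no rules pending, skip empty tokens, else run the worklist pass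
def pvStepB (acc : List PvRule × PySem.Dict String Int) (item : String) :
    List PvRule × PySem.Dict String Int :=
  if acc.1 = [] then acc
  else
    let token := pvNorm item
    if token = [] then acc
    else acc.1.foldl (pvInner token) ([], acc.2)

def services_flags_from_list_py_alt (values : List String) : List (String × Int) :=
  let flags0 : PySem.Dict String Int :=
    pvRules.foldl (fun d r => d.insert r.name 0) PySem.Dict.empty
  ((values.foldl pvStepB (pvRules, flags0)).2).items

-- ===== PRECONDITION & SPEC =====
def Spec_services_flags_from_list_py (values : List String) (out : List (String × Int)) : Prop := out = services_flags_from_list_py_alt values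
instance (values : List String) (out : List (String × Int)) : Decidable (Spec_services_flags_from_list_py values out) := by unfold Spec_services_flags_from_list_py; infer_instance

-- ===== CLAIM (what is proved, stated in full; the proofs are below) =====
def Claim_equal_services_flags_from_list_py : Prop := ∀ (values : List String), Dom_services_flags_from_list_py values → Spec_services_flags_from_list_py values (services_flags_from_list_py values)

-- ===== LEMMAS AND PROOFS =====

-- the three rules, by name
def pvR1 : PvRule := ⟨"has_uc", ["universalcartographics"], ["cartographics"]⟩
def pvR2 : PvRule := ⟨"has_vista", ["vistagenomics"], ["genomics"]⟩
def pvR3 : PvRule := ⟨"has_market", ["commoditymarket"], ["commodities", "market"]⟩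

-- the invariant shape of B's state: bi = rule i still pending (its flag still 0)
def pvGood (b1 b2 b3 : Bool) : List PvRule × PySem.Dict String Int :=
  ((if b1 then [pvR1] else []) ++ (if b2 then [pvR2] else []) ++ (if b3 then [pvR3] else []),
   PySem.Dict.mk [("has_uc", if b1 then (0 : Int) else 1),
                  ("has_vista", if b2 then (0 : Int) else 1),
                  ("has_market", if b3 then (0 : Int) else 1)])

lemma pvR1_name : pvR1.name = "has_uc" := rfl
lemma pvR2_name : pvR2.name = "has_vista" := rfl
lemma pvR3_name : pvR3.name = "has_market" := rfl

lemma pvStepB_good (b1 b2 b3 : Bool) (x : String) :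
    pvStepB (pvGood b1 b2 b3) x =
      pvGood (b1 && !pvMatch (pvNorm x) pvR1) (b2 && !pvMatch (pvNorm x) pvR2)
             (b3 && !pvMatch (pvNorm x) pvR3) := by
  by_cases h : pvNorm x = []
  · cases b1 <;> cases b2 <;> cases b3 <;>
      simp [pvStepB, pvGood, h] <;> decide
  · cases b1 <;> cases b2 <;> cases b3 <;>
      cases hm1 : pvMatch (pvNorm x) pvR1 <;>
      cases hm2 : pvMatch (pvNorm x) pvR2 <;>
      cases hm3 : pvMatch (pvNorm x) pvR3 <;>
      simp [pvStepB, pvGood, pvInner, h, hm1, hm2, hm3, pvR1_name, pvR2_name, pvR3_name,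
        PySem.Dict.insert, PySem.Dict.contains]

lemma pvFoldB_good (vs : List String) : ∀ b1 b2 b3 : Bool,
    vs.foldl pvStepB (pvGood b1 b2 b3)
      = pvGood (b1 && !vs.any (fun x => pvMatch (pvNorm x) pvR1))
               (b2 && !vs.any (fun x => pvMatch (pvNorm x) pvR2))
               (b3 && !vs.any (fun x => pvMatch (pvNorm x) pvR3)) := by
  induction vs with
  | nil => intro b1 b2 b3; simp
  | cons x xs ih =>
    intro b1 b2 b3
    rw [List.foldl_cons, pvStepB_good, ih]
    simp only [List.any_cons, Bool.not_or, Bool.and_assoc]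

-- A's step, stated through pvMatch (definitionally the same conditions)
lemma pvStepA_eq (acc : Int × Int × Int) (x : String) :
    pvStepA acc x =
      if pvNorm x = [] then acc
      else ((if pvMatch (pvNorm x) pvR1 then 1 else acc.1),
            (if pvMatch (pvNorm x) pvR2 then 1 else acc.2.1),
            (if pvMatch (pvNorm x) pvR3 then 1 else acc.2.2)) := by
  simp [pvStepA, pvMatch, pvR1, pvR2, pvR3, or_assoc]

lemma ite_or_flag (a b : Bool) (u : Int) :
    (if b then (1 : Int) else if a then 1 else u) = if (a || b) then 1 else u := by
  cases a <;> cases b <;> simp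

-- A's loop computes, for each flag, "1 iff some token matches the rule, else the start value"
lemma loopA_eq (vs : List String) : ∀ u v m : Int,
    vs.foldl pvStepA (u, v, m)
    = ((if vs.any (fun x => pvMatch (pvNorm x) pvR1) then 1 else u),
       (if vs.any (fun x => pvMatch (pvNorm x) pvR2) then 1 else v),
       (if vs.any (fun x => pvMatch (pvNorm x) pvR3) then 1 else m)) := by
  induction vs with
  | nil => intro u v m; simp
  | cons x xs ih =>
    intro u v m
    rw [List.foldl_cons, pvStepA_eq]
    by_cases h : pvNorm x = []
    · have h1 : pvMatch (pvNorm x) pvR1 = false := by rw [h]; decide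
      have h2 : pvMatch (pvNorm x) pvR2 = false := by rw [h]; decide
      have h3 : pvMatch (pvNorm x) pvR3 = false := by rw [h]; decide
      rw [if_pos h, ih]
      simp [h1, h2, h3]
    · rw [if_neg h, ih]
      simp only [List.any_cons, ite_or_flag]
      rfl

-- B's initial state is the all-pending invariant state
lemma pvInit_good :
    ((pvRules, pvRules.foldl (fun d r => d.insert r.name 0) PySem.Dict.empty)
      : List PvRule × PySem.Dict String Int) = pvGood true true true := by decide

-- ===== VERDICT (by name: the statement is the Claim_ definition above) =====
theorem services_flags_from_list_py_spec : Claim_equal_services_flags_from_list_py := by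
  intro values _
  unfold Spec_services_flags_from_list_py services_flags_from_list_py services_flags_from_list_py_alt
  simp only [pvInit_good, pvFoldB_good, loopA_eq]
  cases h1 : values.any (fun x => pvMatch (pvNorm x) pvR1) <;>
    cases h2 : values.any (fun x => pvMatch (pvNorm x) pvR2) <;>
    cases h3 : values.any (fun x => pvMatch (pvNorm x) pvR3) <;>
    simp [pvGood]
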